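-- pv_equiv track=rewrite | github.com/BAMDH/Cosas_Uni | Intro programación/Prácticas/Notebooks_jupyter/Recursividad_1/buscarCero.py | buscarCeroAuxiliar
-- ===== SOURCE A (Python) =====
-- def buscarCeroAuxiliar(numero):
--     if(numero > 0):
--         residuo10 = numero % 10;
--         divEntera10 = numero // 10;
--         if(residuo10 == 0):
--             return True;
--         else:
--             return buscarCeroAuxiliar(divEntera10);
--     else:
--         return False;
-- ===== SOURCE B (Python) =====
-- def buscarCeroAuxiliar(numero):
--     return numero > 0 and '0' in str(numero)
-- ===== Notes on version B (the rewrite author's own statement) =====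
-- stated objective: idiomatic
-- what changed: Replaces the mod-10/floordiv recursion with a one-line membership test of the digit '0' in the decimal string representation, guarded by positivity.
import Mathlib
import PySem

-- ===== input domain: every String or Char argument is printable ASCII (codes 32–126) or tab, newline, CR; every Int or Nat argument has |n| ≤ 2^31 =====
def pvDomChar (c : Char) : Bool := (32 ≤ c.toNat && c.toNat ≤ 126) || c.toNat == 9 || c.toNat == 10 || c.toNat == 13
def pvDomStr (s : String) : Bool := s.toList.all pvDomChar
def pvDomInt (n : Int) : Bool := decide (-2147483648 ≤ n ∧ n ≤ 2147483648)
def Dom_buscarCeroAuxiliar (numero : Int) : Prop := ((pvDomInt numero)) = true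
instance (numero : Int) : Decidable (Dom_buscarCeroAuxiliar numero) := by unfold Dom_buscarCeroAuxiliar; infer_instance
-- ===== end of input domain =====

-- B replaces A's mod-10/floordiv recursion by the idiomatic one-liner `numero > 0 and '0' in str(numero)`.

-- ===== PORT A =====
def buscarCeroAuxiliar (numero : Int) : Bool :=
  if numero > 0 then
    let residuo10 := PySem.Int.mod numero 10
    let divEntera10 := PySem.Int.floordiv numero 10
    if residuo10 = 0 then true
    else buscarCeroAuxiliar divEntera10
  else false
termination_by numero.toNat
decreasing_by
  rw [PySem.Int.floordiv_eq_ediv_of_pos (by norm_num)]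
  omega

-- ===== PORT B =====
def buscarCeroAuxiliar_alt (numero : Int) : Bool :=
  decide (numero > 0) && PySem.Str.isIn "0" (PySem.Int.toStr numero)

-- ===== PRECONDITION & SPEC =====
def Spec_buscarCeroAuxiliar (numero : Int) (out : Bool) : Prop := out = buscarCeroAuxiliar_alt numero
instance (numero : Int) (out : Bool) : Decidable (Spec_buscarCeroAuxiliar numero out) := by unfold Spec_buscarCeroAuxiliar; infer_instance

-- ===== CLAIM (what is proved, stated in full; the proofs are below) =====
def Claim_equal_buscarCeroAuxiliar : Prop := ∀ (numero : Int), Dom_buscarCeroAuxiliar numero → Spec_buscarCeroAuxiliar numero (buscarCeroAuxiliar numero)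

-- ===== LEMMAS AND PROOFS =====

/-- A's recursion restated on `Nat`. -/
def hzNat (n : Nat) : Bool :=
  if 0 < n then
    (if n % 10 = 0 then true else hzNat (n / 10))
  else false
termination_by n
decreasing_by omega

/-- Only the digit 0 prints as '0'. -/
lemma digitChar_eq_zero_iff : ∀ d : Nat, d < 10 → (Nat.digitChar d = '0' ↔ d = 0) := by decide

/-- Membership of '0' in the fuelled digit printer, against A's recursion. -/
lemma mem_toDigitsCore (f : Nat) : ∀ (n : Nat) (l : List Char), n < f → 0 < n →
    ('0' ∈ Nat.toDigitsCore 10 f n l ↔ hzNat n = true ∨ '0' ∈ l) := by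
  induction f with
  | zero => intro n l h; omega
  | succ f ih =>
    intro n l hf hn
    rw [Nat.toDigitsCore]
    by_cases h10 : n / 10 = 0
    · rw [if_pos h10]
      have hlt : n % 10 < 10 := Nat.mod_lt _ (by norm_num)
      have hne : n % 10 ≠ 0 := by omega
      rw [hzNat, if_pos hn, if_neg hne, h10, hzNat]
      simp only [List.mem_cons]
      constructor
      · rintro (h | h)
        · exact absurd ((digitChar_eq_zero_iff _ hlt).1 h.symm) hne
        · exact Or.inr h
      · rintro (h | h)
        · simp at h
        · exact Or.inr h
    · rw [if_neg h10]
      have h10' : 0 < n / 10 := Nat.pos_of_ne_zero h10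
      have hrec := ih (n / 10) (Nat.digitChar (n % 10) :: l) (by omega) h10'
      rw [hrec]
      conv_rhs => rw [hzNat]
      rw [if_pos hn]
      have hlt : n % 10 < 10 := Nat.mod_lt _ (by norm_num)
      by_cases hm : n % 10 = 0
      · rw [if_pos hm]
        simp only [List.mem_cons]
        constructor
        · intro _; exact Or.inl trivial
        · intro _
          exact Or.inr (Or.inl ((digitChar_eq_zero_iff _ hlt).2 hm).symm)
      · rw [if_neg hm]
        simp only [List.mem_cons]
        constructor
        · rintro (h | h | h)
          · exact Or.inl h
          · exact absurd ((digitChar_eq_zero_iff _ hlt).1 h.symm) hm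
          · exact Or.inr h
        · rintro (h | h)
          · exact Or.inl h
          · exact Or.inr (Or.inr h)

lemma hzNat_iff_mem_toDigits (n : Nat) (hn : 0 < n) :
    hzNat n = true ↔ '0' ∈ Nat.toDigits 10 n := by
  rw [Nat.toDigits, mem_toDigitsCore (n + 1) n [] (by omega) hn]
  simp

/-- A's port computes `hzNat` on the absolute value, for positive input. -/
lemma buscarCeroAuxiliar_eq_hzNat_aux : ∀ (m : Nat) (n : Int), 0 < n → n.toNat ≤ m → buscarCeroAuxiliar n = hzNat n.toNat := by
  intro m
  induction m with
  | zero => intro n hn hle; omega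
  | succ m ih =>
    intro n hn hle
    rw [buscarCeroAuxiliar, if_pos hn]
    have hmod : PySem.Int.mod n 10 = n % 10 := PySem.Int.mod_eq_emod_of_pos (by norm_num)
    have hdiv : PySem.Int.floordiv n 10 = n / 10 := PySem.Int.floordiv_eq_ediv_of_pos (by norm_num)
    rw [hmod, hdiv]
    have hNn : 0 < n.toNat := by omega
    rw [hzNat, if_pos hNn]
    have hmn : n % 10 = 0 ↔ n.toNat % 10 = 0 := by omega
    by_cases hm : n % 10 = 0
    · rw [if_pos hm, if_pos (hmn.1 hm)]
    · rw [if_neg hm, if_neg (fun h => hm (hmn.2 h))]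
      have hq : (n / 10).toNat = n.toNat / 10 := by omega
      by_cases hq0 : n / 10 = 0
      · rw [hq0, buscarCeroAuxiliar]
        have : (0 : Int).toNat / 10 = 0 := by norm_num
        have h0 : n.toNat / 10 = 0 := by omega
        rw [h0, hzNat]
        simp
      · have hqpos : 0 < n / 10 := by positivity
        have hle' : (n / 10).toNat ≤ m := by omega
        rw [ih (n / 10) hqpos hle', hq]

lemma buscarCeroAuxiliar_eq_hzNat (n : Int) (hn : 0 < n) : buscarCeroAuxiliar n = hzNat n.toNat :=
  buscarCeroAuxiliar_eq_hzNat_aux n.toNat n hn le_rfl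

-- ===== VERDICT (by name: the statement is the Claim_ definition above) =====
theorem buscarCeroAuxiliar_spec : Claim_equal_buscarCeroAuxiliar := by
  intro n _
  unfold Spec_buscarCeroAuxiliar buscarCeroAuxiliar_alt
  by_cases hn : 0 < n
  · rw [buscarCeroAuxiliar_eq_hzNat n hn]
    simp only [decide_eq_true hn, Bool.true_and]
    rw [Bool.eq_iff_iff, hzNat_iff_mem_toDigits n.toNat (by omega),
        PySem.Str.isIn_iff_infix, PySem.Int.toList_toStr, PySem.Int.toChars,
        if_neg (by omega : ¬ n < 0)]
    exact (List.singleton_infix_iff '0' _).symm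
  · rw [buscarCeroAuxiliar, if_neg hn]
    simp [hn]
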